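-- pv_equiv track=rewrite | github.com/shih70/ECE30861-Group18 | src/cli_project/metrics/dataset_and_code.py | _file_signals
-- ===== SOURCE A (Python) =====
-- from typing import Any, Dict, Iterable, Optional
--
-- _COMMON_CODE_FILES = {
--     "train.py", "training.py", "finetune.py", "evaluate.py", "eval.py",
--     "inference.py", "predict.py", "demo.py",
-- }
--
-- _COMMON_CODE_DIRS = {"examples", "scripts", "notebooks", "demo", "demos"}
--
-- def _file_signals(file_list: Iterable[str] | None) -> Dict[str, bool]:
--     """Look for common code files/dirs that imply runnable examples."""
--     found_files = False
--     found_dirs = False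
--     if file_list:
--         lowered = [str(f).lower() for f in file_list if isinstance(f, str)]
--         for f in lowered:
--             base = f.split("/")[-1]
--             if base in _COMMON_CODE_FILES:
--                 found_files = True
--             parts = f.split("/")
--             if any(part in _COMMON_CODE_DIRS for part in parts):
--                 found_dirs = True
--             if found_files and found_dirs:
--                 break
--     return {"example_files": found_files, "example_dirs": found_dirs}
-- ===== SOURCE B (Python) =====
-- from typing import Dict, Iterable
--
-- _COMMON_CODE_FILES = {
--     "train.py", "training.py", "finetune.py", "evaluate.py", "eval.py",
--     "inference.py", "predict.py", "demo.py",
-- }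
--
-- _COMMON_CODE_DIRS = {"examples", "scripts", "notebooks", "demo", "demos"}
--
-- def _file_signals(file_list: Iterable[str] | None) -> Dict[str, bool]:
--     """Index the listing once into two sets, then answer by set intersection."""
--     lowered = [str(f).lower() for f in file_list if isinstance(f, str)] if file_list else []
--     basenames = {p.split("/")[-1] for p in lowered}
--     all_parts = {part for p in lowered for part in p.split("/")}
--     return {
--         "example_files": bool(basenames & _COMMON_CODE_FILES),
--         "example_dirs": bool(all_parts & _COMMON_CODE_DIRS),
--     }
-- ===== Notes on version B (the rewrite author's own statement) =====
-- stated objective: idiomatic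
-- what changed: Replaces the stateful flag loop with early exit by building a basename set and an all-path-parts set in comprehensions and answering both signals by set intersection.
import Mathlib
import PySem

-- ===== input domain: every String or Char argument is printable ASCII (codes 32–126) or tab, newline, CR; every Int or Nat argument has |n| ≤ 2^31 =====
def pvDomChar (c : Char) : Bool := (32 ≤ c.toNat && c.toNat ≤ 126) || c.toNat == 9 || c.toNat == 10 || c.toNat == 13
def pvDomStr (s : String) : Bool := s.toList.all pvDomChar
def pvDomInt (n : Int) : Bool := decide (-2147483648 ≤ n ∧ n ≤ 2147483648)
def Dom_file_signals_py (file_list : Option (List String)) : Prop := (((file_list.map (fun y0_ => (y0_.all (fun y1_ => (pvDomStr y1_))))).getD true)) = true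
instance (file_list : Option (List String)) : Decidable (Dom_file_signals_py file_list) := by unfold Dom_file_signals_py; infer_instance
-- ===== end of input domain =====

-- B replaces A's stateful flag loop (early exit) by building two index sets and testing them by intersection; same cost, more idiomatic.

-- module constants _COMMON_CODE_FILES / _COMMON_CODE_DIRS (Python sets of distinct literals)
def commonCodeFiles : PySem.Set String := PySem.Set.ofList
  ["train.py", "training.py", "finetune.py", "evaluate.py", "eval.py",
   "inference.py", "predict.py", "demo.py"]

def commonCodeDirs : PySem.Set String := PySem.Set.ofList
  ["examples", "scripts", "notebooks", "demo", "demos"]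

-- ===== PORT A =====
-- s.split("/"): sep "/" is nonempty, so Str.split? always returns some — getD [] is exact here
def pySplitSlash (s : String) : List String := (PySem.Str.split? s "/").getD []

-- the 'for f in lowered' loop with its two flags and 'break'
def fsLoop : List String → Bool → Bool → Bool × Bool
  | [], foundFiles, foundDirs => (foundFiles, foundDirs)
  | f :: rest, foundFiles, foundDirs =>
    -- base = f.split("/")[-1]; split("/") is never empty, so [-1] is total (default "" unreachable)
    let base := PySem.List.pyGetD (pySplitSlash f) (-1) ""
    let foundFiles' := if commonCodeFiles.contains base then true else foundFiles
    let parts := pySplitSlash f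
    let foundDirs' := if parts.any (fun p => commonCodeDirs.contains p) then true else foundDirs
    if foundFiles' && foundDirs' then (foundFiles', foundDirs')   -- break
    else fsLoop rest foundFiles' foundDirs'

def file_signals_py (file_list : Option (List String)) : List (String × Bool) :=
  -- 'if file_list:' — truthy iff some nonempty list; isinstance(f, str) always holds here
  let r : Bool × Bool :=
    match file_list with
    | none => (false, false)
    | some fs => if fs.isEmpty then (false, false) else fsLoop (fs.map PySem.Str.lower) false false
  [("example_files", r.1), ("example_dirs", r.2)]

-- ===== PORT B =====
def file_signals_py_alt (file_list : Option (List String)) : List (String × Bool) :=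
  let lowered : List String :=
    match file_list with
    | none => []
    | some fs => if fs.isEmpty then [] else fs.map PySem.Str.lower
  let basenames : PySem.Set String :=
    PySem.Set.ofList (lowered.map (fun p => PySem.List.pyGetD (pySplitSlash p) (-1) ""))
  let allParts : PySem.Set String :=
    PySem.Set.ofList (lowered.flatMap (fun p => pySplitSlash p))
  [("example_files", !(PySem.Set.inter basenames commonCodeFiles).isEmpty),
   ("example_dirs", !(PySem.Set.inter allParts commonCodeDirs).isEmpty)]

-- ===== PRECONDITION & SPEC =====
def Spec_file_signals_py (file_list : Option (List String)) (out : List (String × Bool)) : Prop := out = file_signals_py_alt file_list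
instance (file_list : Option (List String)) (out : List (String × Bool)) : Decidable (Spec_file_signals_py file_list out) := by unfold Spec_file_signals_py; infer_instance

-- ===== CLAIM (what is proved, stated in full; the proofs are below) =====
def Claim_equal_file_signals_py : Prop := ∀ (file_list : Option (List String)), Dom_file_signals_py file_list → Spec_file_signals_py file_list (file_signals_py file_list)

-- ===== LEMMAS AND PROOFS =====

-- A's loop computes the disjunction of the per-element hits (the break never changes the result)
theorem fsLoop_eq (fs : List String) (ff fd : Bool) :
    fsLoop fs ff fd =
      (ff || fs.any (fun f => commonCodeFiles.contains (PySem.List.pyGetD (pySplitSlash f) (-1) "")),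
       fd || fs.any (fun f => (pySplitSlash f).any (fun p => commonCodeDirs.contains p))) := by
  induction fs generalizing ff fd with
  | nil => simp [fsLoop]
  | cons f rest ih =>
    simp only [fsLoop, List.any_cons]
    cases hb : commonCodeFiles.contains (PySem.List.pyGetD (pySplitSlash f) (-1) "") <;>
    cases hd : (pySplitSlash f).any (fun p => commonCodeDirs.contains p) <;>
      simp [ih] <;> cases ff <;> cases fd <;> simp

-- set(xs) ∩ S nonempty ↔ some element of xs is in S
theorem inter_nonempty_eq_any (xs : List String) (S : PySem.Set String) :
    (!(PySem.Set.inter (PySem.Set.ofList xs) S).isEmpty) = xs.any (fun x => S.contains x) := by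
  rw [Bool.eq_iff_iff]
  simp only [Bool.not_eq_eq_eq_not, Bool.not_true, List.isEmpty_eq_false_iff_exists_mem,
    List.any_eq_true]
  constructor
  · rintro ⟨x, hx⟩
    have := (PySem.Set.mem_inter (PySem.Set.ofList xs) S x).mp hx
    exact ⟨x, (PySem.Set.mem_ofList xs x).mp this.1, (PySem.Set.contains_iff S x).mpr this.2⟩
  · rintro ⟨x, hx, hc⟩
    exact ⟨x, (PySem.Set.mem_inter (PySem.Set.ofList xs) S x).mpr ⟨(PySem.Set.mem_ofList xs x).mpr hx,
      (PySem.Set.contains_iff S x).mp hc⟩⟩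

-- ===== VERDICT (by name: the statement is the Claim_ definition above) =====
theorem file_signals_py_spec : Claim_equal_file_signals_py := by
  intro file_list _
  unfold Spec_file_signals_py file_signals_py file_signals_py_alt
  have hnil : ∀ S : PySem.Set String, PySem.Set.inter ([] : List String) S = [] := by
    intro S; rfl
  rcases file_list with _ | fs
  · simp [hnil]
  · by_cases h : fs.isEmpty <;>
      simp [h, hnil, fsLoop_eq, inter_nonempty_eq_any, List.any_map, List.any_flatMap,
        Function.comp_def]
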